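-- pv_equiv track=rewrite | github.com/dragonoverlord3000/Kaeple | utils/formatter_utils.py | separate_states_of_matter
-- ===== SOURCE A (Python) =====
-- def separate_states_of_matter(compound_list):
--     """
--     Args:
--         compund_list (list) - list of compounds - can be capitalized or non-capitalized
--
--     Returns (tuple):
--         new_compound_list (list) - compund list without states of matter
--         states_of_matter_list (list) - list of the states of matter
--
--     Example:
--         >>>separate_states_of_matter(["h2o(g)", "C6H12O6(aq)", "CH3CH2(CHO)CH3(heptane)"])
--         (['h2o', 'C6H12O6', 'CH3CH2(CHO)CH3'], ['(g)', '(aq)', '(heptane)'])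
--     """
--
--     # Make sure there are no arrows in the reaction
--     t_list = []
--     for compound in compound_list:
--         t = compound.replace("=>", "")
--         t_list += [t.strip()]
--
--     compound_list = t_list
--
--
--     new_compound_list = []
--     states_of_matter_list = []
--
--     # Essentially just reverses the compound string and checks for **normal parentheses** i.e. `(` and `)`
--     for compound in compound_list:
--         number_of_left = 0
--         number_of_right = 0
--
--         first = True
--
--         number_of_char = 0
--
--         for char in reversed(compound):
--             if first and (char != ")"):
--                 break
--             elif first:
--                 first = False
--                 number_of_right += 1
--                 number_of_char += 1
--
--             elif number_of_right == number_of_left: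
--                 break
--
--             elif char == ")":
--                 number_of_right += 1
--                 number_of_char += 1
--
--             elif char == "(":
--                 number_of_left += 1
--                 number_of_char += 1
--
--             else:
--                 number_of_char += 1
--
--         if number_of_char > 0:
--             new_compound_list += [compound[:-number_of_char]]
--             states_of_matter_list += [compound[-number_of_char:]]
--         else:
--             new_compound_list += [compound]
--             states_of_matter_list += [""]
--
--
--     return new_compound_list, states_of_matter_list
-- ===== SOURCE B (Python) =====
-- def _split_state(s):
--     # Split the trailing parenthesized state of matter off one compound.
--     if not s or s[-1] != ")":
--         return (s, "")
--     # Forward scan: stack of '(' indices over everything before the final ')'.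
--     stack = []
--     for i, c in enumerate(s[:-1]):
--         if c == "(":
--             stack.append(i)
--         elif c == ")" and stack:
--             stack.pop()
--     if stack:
--         j = stack[-1]
--         return (s[:j], s[j:])
--     return ("", s)
--
-- def separate_states_of_matter(compound_list):
--     # Make sure there are no arrows in the reaction
--     t_list = []
--     for compound in compound_list:
--         t = compound.replace("=>", "")
--         t_list += [t.strip()]
--     pairs = [_split_state(t) for t in t_list]
--     return [p[0] for p in pairs], [p[1] for p in pairs]
-- ===== Notes on version B (the rewrite author's own statement) =====
-- stated objective: alternative
-- what changed: A scans each compound backwards counting left/right parentheses with an early break; B scans forwards once, maintaining a stack of '(' indices, and splits at the stack top matching the final ')' (same preprocessing, same values).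
import Mathlib
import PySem

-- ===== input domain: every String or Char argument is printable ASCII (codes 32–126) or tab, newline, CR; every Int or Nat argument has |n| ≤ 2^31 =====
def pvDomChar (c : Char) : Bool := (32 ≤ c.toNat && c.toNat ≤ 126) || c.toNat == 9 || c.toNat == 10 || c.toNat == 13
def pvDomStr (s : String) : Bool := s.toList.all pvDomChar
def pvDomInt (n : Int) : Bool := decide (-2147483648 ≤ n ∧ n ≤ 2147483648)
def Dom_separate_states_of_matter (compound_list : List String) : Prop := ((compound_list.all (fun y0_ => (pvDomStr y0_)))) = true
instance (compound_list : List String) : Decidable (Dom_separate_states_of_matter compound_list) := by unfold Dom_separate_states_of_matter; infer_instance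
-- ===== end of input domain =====

-- B replaces A's backward balance-counting loop by a single forward scan with a stack of '(' indices
-- (objective: simpler / alternative decomposition; same preprocessing, same return values).

-- ===== PORT A =====
-- A's inner 'for char in reversed(compound)' loop; state = (number_of_left, number_of_right, first, number_of_char); returns number_of_char
def pvALoop : List Char → Nat → Nat → Bool → Nat → Nat
  | [], _, _, _, nchar => nchar
  | c :: cs, nleft, nright, first, nchar =>
    if first && !(c == ')') then nchar
    else if first then pvALoop cs nleft (nright + 1) false (nchar + 1)
    else if nright == nleft then nchar
    else if c == ')' then pvALoop cs nleft (nright + 1) first (nchar + 1)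
    else if c == '(' then pvALoop cs (nleft + 1) nright first (nchar + 1)
    else pvALoop cs nleft nright first (nchar + 1)

def separate_states_of_matter (compound_list : List String) : List String × List String :=
  let t_list := compound_list.foldl
    (fun acc compound => acc ++ [PySem.Str.strip (PySem.Str.replace compound "=>" "")]) []
  t_list.foldl
    (fun acc compound =>
      let nchar := pvALoop compound.toList.reverse 0 0 true 0
      if 0 < nchar then
        (acc.1 ++ [PySem.Str.slice compound none (some (-(nchar : Int)))],
         acc.2 ++ [PySem.Str.slice compound (some (-(nchar : Int))) none])
      else (acc.1 ++ [compound], acc.2 ++ [""]))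
    ([], [])

-- ===== PORT B =====
-- stack step: push the index of '(', pop on ')' if the stack is nonempty (top of the stack = head)
def pvBStep (stk : List Int) (p : Int × Char) : List Int :=
  if p.2 == '(' then p.1 :: stk
  else if p.2 == ')' && !stk.isEmpty then stk.tail
  else stk

def pvBSplit (s : String) : String × String :=
  if s == "" || !(PySem.Str.pyGet? s (-1) == some ')') then (s, "")
  else
    let stk := (PySem.List.enumerate (PySem.Str.slice s none (some (-1))).toList 0).foldl pvBStep []
    match stk with
    | j :: _ => (PySem.Str.slice s none (some j), PySem.Str.slice s (some j) none)
    | [] => ("", s)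

def separate_states_of_matter_alt (compound_list : List String) : List String × List String :=
  let t_list := compound_list.foldl
    (fun acc compound => acc ++ [PySem.Str.strip (PySem.Str.replace compound "=>" "")]) []
  let pairs := t_list.map pvBSplit
  (pairs.map (·.1), pairs.map (·.2))

-- ===== PRECONDITION & SPEC =====
def Spec_separate_states_of_matter (compound_list : List String) (out : List String × List String) : Prop := out = separate_states_of_matter_alt compound_list
instance (compound_list : List String) (out : List String × List String) : Decidable (Spec_separate_states_of_matter compound_list out) := by unfold Spec_separate_states_of_matter; infer_instance

-- ===== CLAIM (what is proved, stated in full; the proofs are below) =====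
def Claim_equal_separate_states_of_matter : Prop := ∀ (compound_list : List String), Dom_separate_states_of_matter compound_list → Spec_separate_states_of_matter compound_list (separate_states_of_matter compound_list)

-- ===== LEMMAS AND PROOFS =====

-- what A's loop computes, phrased against B's stack: depth d still to cancel, stack index d-1
def pvSpec (stk : List Int) (d len n : Nat) : Nat :=
  if d = 0 then n else n + len - (stk.getD (d - 1) 0).toNat

def pvStk (t : List Char) : List Int := (PySem.List.enumerate t 0).foldl pvBStep []

theorem pvStk_bounds_aux (t : List Char) : ∀ (s0 : List Int) (k : Int), 0 ≤ k →
    (∀ j ∈ s0, 0 ≤ j ∧ j < k) →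
    ∀ j ∈ (PySem.List.enumerate t k).foldl pvBStep s0, 0 ≤ j ∧ j < k + t.length := by
  induction t with
  | nil => intro s0 k hk0 h j hj; simpa [PySem.List.enumerate] using h j hj
  | cons c t ih =>
    intro s0 k hk0 h j hj
    rw [PySem.List.enumerate_cons] at hj
    simp only [List.foldl_cons] at hj
    have h' : ∀ j ∈ pvBStep s0 (k, c), 0 ≤ j ∧ j < k + 1 := by
      intro j hj
      unfold pvBStep at hj
      split_ifs at hj with h1 h2
      · rcases List.mem_cons.mp hj with h0 | hj
        · have hk : j = k := h0
          omega
        · have := h j hj; omega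
      · have := h j (List.mem_of_mem_tail hj); omega
      · have := h j hj; omega
    have := ih (pvBStep s0 (k, c)) (k + 1) (by omega) h' j hj
    simp only [List.length_cons]
    omega

theorem pvStk_bounds (t : List Char) : ∀ j ∈ pvStk t, 0 ≤ j ∧ j < (t.length : Int) := by
  intro j hj
  have := pvStk_bounds_aux t [] 0 le_rfl (by simp) j hj
  omega

theorem pvStk_append (t : List Char) (c : Char) :
    pvStk (t ++ [c]) = pvBStep (pvStk t) ((t.length : Int), c) := by
  unfold pvStk
  rw [PySem.List.enumerate_append]
  simp [PySem.List.enumerate]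

theorem pvALoop_step (c : Char) (cs : List Char) (l r n : Nat) (h : l < r) :
    pvALoop (c :: cs) l r false n =
      if c = ')' then pvALoop cs l (r + 1) false (n + 1)
      else if c = '(' then pvALoop cs (l + 1) r false (n + 1)
      else pvALoop cs l r false (n + 1) := by
  have hne : (r == l) = false := by simp; omega
  by_cases hc1 : c = ')'
  · simp [pvALoop, hne, hc1]
  · by_cases hc2 : c = '('
    · simp [pvALoop, hne, hc2]
    · simp [pvALoop, hne, hc1, hc2]

theorem pvSpec_pos (stk : List Int) (d len n : Nat) (h : ¬ d = 0) :
    pvSpec stk d len n = n + len - (stk.getD (d - 1) 0).toNat := by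
  unfold pvSpec; rw [if_neg h]

theorem pvALoop_eq_pvSpec (t : List Char) : ∀ (l r n : Nat), l ≤ r →
    pvALoop t.reverse l r false n = pvSpec (pvStk t) (r - l) t.length n := by
  induction t using List.reverseRecOn with
  | nil =>
    intro l r n hlr
    unfold pvSpec
    rcases Nat.eq_or_lt_of_le hlr with h | h
    · simp [pvALoop, h]
    · simp only [List.reverse_nil, pvALoop]
      rw [if_neg (by omega)]
      simp [pvStk, PySem.List.enumerate]
  | append_singleton t c ih =>
    intro l r n hlr
    rw [pvStk_append, List.reverse_append]
    simp only [List.reverse_cons, List.reverse_nil, List.nil_append, List.cons_append,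
      List.length_append, List.length_cons, List.length_nil]
    rcases Nat.eq_or_lt_of_le hlr with rfl | hlt
    · -- l = r : A breaks immediately, pvSpec gives n
      simp [pvALoop, pvSpec]
    · rw [pvALoop_step c t.reverse l r n hlt]
      by_cases hc1 : c = ')'
      · subst hc1
        rw [if_pos rfl, ih l (r + 1) (n + 1) (by omega),
          pvSpec_pos _ _ _ _ (by omega), pvSpec_pos _ _ _ _ (by omega)]
        cases hstk : pvStk t with
        | nil => simp [pvBStep]; omega
        | cons x xs =>
          simp only [pvBStep, List.isEmpty_cons, Bool.not_false, Bool.and_true]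
          rw [if_neg (by decide), if_pos (by decide), List.tail_cons]
          have hidx : r + 1 - l - 1 = (r - l - 1) + 1 := by omega
          rw [hidx, List.getD_cons_succ]
          omega
      · by_cases hc2 : c = '('
        · subst hc2
          rw [if_neg (by decide), if_pos rfl, ih (l + 1) r (n + 1) (by omega)]
          simp only [pvBStep]
          rw [if_pos (by decide)]
          by_cases hd1 : r - l = 1
          · unfold pvSpec
            rw [if_pos (by omega), if_neg (by omega), hd1]
            simp
            omega
          · rw [pvSpec_pos _ _ _ _ (by omega), pvSpec_pos _ _ _ _ (by omega)]
            have hidx : r - l - 1 = (r - (l + 1) - 1) + 1 := by omega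
            rw [hidx, List.getD_cons_succ]
            omega
        · rw [if_neg hc1, if_neg hc2, ih l r (n + 1) hlr,
            pvSpec_pos _ _ _ _ (by omega), pvSpec_pos _ _ _ _ (by omega)]
          simp only [pvBStep]
          rw [if_neg (by simp [hc2]), if_neg (by simp [hc1])]
          omega

-- per-string equality of the two splitting procedures
theorem pvSplit_eq (s : String) :
    (if 0 < pvALoop s.toList.reverse 0 0 true 0 then
       (PySem.Str.slice s none (some (-(pvALoop s.toList.reverse 0 0 true 0 : Int))),
        PySem.Str.slice s (some (-(pvALoop s.toList.reverse 0 0 true 0 : Int))) none)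
     else (s, ""))
    = pvBSplit s := by
  rcases List.eq_nil_or_concat s.toList with h0 | ⟨t, c, h0⟩
  all_goals try rw [List.concat_eq_append] at h0
  · -- empty string
    have hs : s = "" := String.toList_inj.mp (by simp [h0])
    subst hs
    simp [pvALoop, pvBSplit]
  · by_cases hc : c = ')'
    · subst hc
      -- A's loop after its first iteration, through the stack characterisation
      have hA : pvALoop s.toList.reverse 0 0 true 0 =
          pvSpec (pvStk t) 1 t.length 1 := by
        rw [h0, List.reverse_append]
        simp only [List.reverse_cons, List.reverse_nil, List.nil_append, List.singleton_append]
        show pvALoop (')' :: t.reverse) 0 0 true 0 = _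
        simp only [pvALoop]
        rw [if_neg (by decide), if_pos (by decide)]
        exact pvALoop_eq_pvSpec t 0 1 1 (by omega)
      have hne : (s == "") = false := by
        simp only [beq_eq_false_iff_ne, ne_eq]
        intro he; rw [he] at h0; simp at h0
      have hget : PySem.Str.pyGet? s (-1) = some ')' := by
        simp [PySem.Str.pyGet?, PySem.List.pyGet?_neg_one, h0]
      have hdrop : (PySem.Str.slice s none (some (-1))).toList = t := by
        rw [PySem.Str.slice_to_neg_one, h0, List.dropLast_concat]
      unfold pvBSplit
      rw [hne, hget]
      simp only [Bool.false_or, beq_self_eq_true, Bool.not_true, Bool.false_eq_true, if_false]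
      rw [hdrop]
      have hfold : (PySem.List.enumerate t 0).foldl pvBStep [] = pvStk t := rfl
      rw [hfold]
      have hlen : s.toList.length = t.length + 1 := by rw [h0]; simp
      cases hstk : pvStk t with
      | nil =>
        -- unmatched final ')': A consumes everything, B's stack is empty
        have hnchar : pvALoop s.toList.reverse 0 0 true 0 = t.length + 1 := by
          rw [hA, pvSpec_pos _ _ _ _ (by omega), hstk]; simp; omega
        rw [hnchar, if_pos (by omega)]
        refine Prod.ext ?_ ?_ <;> apply String.toList_inj.mp
        · rw [PySem.Str.toList_slice]
          simp only [PySem.Chars.slice]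
          rw [PySem.List.slice_to_neg_natCast _ (t.length + 1) (by omega), hlen]
          simp
        · rw [PySem.Str.toList_slice]
          simp only [PySem.Chars.slice]
          rw [PySem.List.slice_from_neg_natCast _ (t.length + 1) (by omega), hlen]
          simp
      | cons j js =>
        -- the final ')' matches the '(' at index j = top of B's stack
        have hj : 0 ≤ j ∧ j < (t.length : Int) := by
          have := pvStk_bounds t j; rw [hstk] at this; exact this (by simp)
        have hnchar : pvALoop s.toList.reverse 0 0 true 0 = t.length + 1 - j.toNat := by
          rw [hA, pvSpec_pos _ _ _ _ (by omega), hstk]; simp; omega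
        rw [hnchar, if_pos (by omega)]
        refine Prod.ext ?_ ?_ <;> apply String.toList_inj.mp
        · rw [PySem.Str.toList_slice, PySem.Str.toList_slice]
          simp only [PySem.Chars.slice]
          rw [PySem.List.slice_to_neg_natCast _ (t.length + 1 - j.toNat) (by omega),
            PySem.List.slice_to _ hj.1, hlen]
          congr 1
          omega
        · rw [PySem.Str.toList_slice, PySem.Str.toList_slice]
          simp only [PySem.Chars.slice]
          rw [PySem.List.slice_from_neg_natCast _ (t.length + 1 - j.toNat) (by omega),
            PySem.List.slice_from _ hj.1, hlen]
          congr 1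
          omega
    · -- last character is not ')': both sides return (s, "")
      have hA : pvALoop s.toList.reverse 0 0 true 0 = 0 := by
        rw [h0, List.reverse_append]
        simp only [List.reverse_cons, List.reverse_nil, List.nil_append, List.singleton_append]
        simp [pvALoop, hc]
      have hget : PySem.Str.pyGet? s (-1) = some c := by
        simp [PySem.Str.pyGet?, PySem.List.pyGet?_neg_one, h0]
      rw [hA, if_neg (by omega)]
      unfold pvBSplit
      rw [hget]
      have : ((some c == some ')') : Bool) = false := by simp [hc]
      rw [this]
      simp

-- the per-compound loop of A against B's map of pvBSplit
theorem pvFoldA_eq (ts : List String) : ∀ (acc : List String × List String),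
    ts.foldl
      (fun acc compound =>
        let nchar := pvALoop compound.toList.reverse 0 0 true 0
        if 0 < nchar then
          (acc.1 ++ [PySem.Str.slice compound none (some (-(nchar : Int)))],
           acc.2 ++ [PySem.Str.slice compound (some (-(nchar : Int))) none])
        else (acc.1 ++ [compound], acc.2 ++ [""])) acc
    = (acc.1 ++ (ts.map pvBSplit).map Prod.fst, acc.2 ++ (ts.map pvBSplit).map Prod.snd) := by
  induction ts with
  | nil => intro acc; simp
  | cons x ts ih =>
    intro acc
    rw [List.foldl_cons, ih]
    have hx : (let nchar := pvALoop x.toList.reverse 0 0 true 0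
        if 0 < nchar then
          (acc.1 ++ [PySem.Str.slice x none (some (-(nchar : Int)))],
           acc.2 ++ [PySem.Str.slice x (some (-(nchar : Int))) none])
        else (acc.1 ++ [x], acc.2 ++ [""]))
        = (acc.1 ++ [(pvBSplit x).1], acc.2 ++ [(pvBSplit x).2]) := by
      rw [← pvSplit_eq x]
      by_cases h : 0 < pvALoop x.toList.reverse 0 0 true 0
      · simp only [h, if_true]
      · simp only [h, if_false]
    rw [hx]
    simp

-- ===== VERDICT (by name: the statement is the Claim_ definition above) =====
theorem separate_states_of_matter_spec : Claim_equal_separate_states_of_matter := by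
  intro compound_list _
  unfold Spec_separate_states_of_matter separate_states_of_matter separate_states_of_matter_alt
  rw [pvFoldA_eq]
  simp [List.map_map]
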